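-- pv_equiv track=rewrite | github.com/Chillyfeely/algoleague-HUPROG-24 | peaches.py | max_peaches
-- ===== SOURCE A (Python) =====
-- import heapq
--
-- def max_peaches(N, D, A):
--     assert 1 <= N <= 10**5, "N is out of range"
--     assert all(0 <= Di <= 10**4 for Di in D), "Some Di is out of range"
--     assert all(0 <= Ai <= 10**4 for Ai in A), "Some Ai is out of range"
--     heap = []  # Heap to keep track of peaches and their expiry dates.
--     total_peaches_eaten = 0
--     day = 0  # Initialize the day counter.
--
--     # Calculate the maximum possible day to consider, in case we need to go beyond the provided arrays.
--     # This is to ensure we process days until all peaches have been considered for consumption.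
--     max_days = len(D) + max(A)
--
--     while day < max_days:
--         # Add new peaches for the current day to the heap, if there are any.
--         if day < len(D) and D[day] > 0:
--             heapq.heappush(heap, (day + A[day], D[day]))
--
--         # Eat a peach if there's any that hasn't expired.
--         while heap:
--             nearest_expiry, available_peaches = heapq.heappop(heap)
--             if nearest_expiry > day:  # Check if the peach hasn't expired.
--                 total_peaches_eaten += 1
--                 if available_peaches > 1:
--                     # If there are more peaches that haven't been eaten, put them back with one less.
--                     heapq.heappush(heap, (nearest_expiry, available_peaches - 1))
--                 break  # Stop after eating one peach for the day.
--
--         day += 1  # Move to the next day.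
--
--     return total_peaches_eaten
-- ===== SOURCE B (Python) =====
-- def max_peaches(N, D, A):
--     assert 1 <= N <= 10**5, "N is out of range"
--     assert all(0 <= Di <= 10**4 for Di in D), "Some Di is out of range"
--     assert all(0 <= Ai <= 10**4 for Ai in A), "Some Ai is out of range"
--     max_days = len(D) + max(A)
--     # counts[e] = number of not-yet-eaten peaches whose last edible day is e - 1.
--     counts = [0] * (max_days + 1)
--     total = 0
--     ptr = 0  # every bucket e with day < e < ptr is known to be empty
--     for day in range(max_days):
--         if day < len(D) and D[day] > 0:
--             e = day + A[day]
--             counts[e] += D[day]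
--             if e < ptr:
--                 ptr = e
--         if ptr <= day:
--             ptr = day + 1
--         while ptr < max_days and counts[ptr] == 0:
--             ptr += 1
--         if ptr < max_days:
--             counts[ptr] -= 1
--             total += 1
--     return total
-- ===== Notes on version B (the rewrite author's own statement) =====
-- stated objective: faster
-- what changed: Replaces the per-day binary heap of (expiry,count) batches by a flat bucket array of peach counts indexed by expiry day, scanned with an amortized pointer for the nearest non-empty unexpired bucket.
import Mathlib
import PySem

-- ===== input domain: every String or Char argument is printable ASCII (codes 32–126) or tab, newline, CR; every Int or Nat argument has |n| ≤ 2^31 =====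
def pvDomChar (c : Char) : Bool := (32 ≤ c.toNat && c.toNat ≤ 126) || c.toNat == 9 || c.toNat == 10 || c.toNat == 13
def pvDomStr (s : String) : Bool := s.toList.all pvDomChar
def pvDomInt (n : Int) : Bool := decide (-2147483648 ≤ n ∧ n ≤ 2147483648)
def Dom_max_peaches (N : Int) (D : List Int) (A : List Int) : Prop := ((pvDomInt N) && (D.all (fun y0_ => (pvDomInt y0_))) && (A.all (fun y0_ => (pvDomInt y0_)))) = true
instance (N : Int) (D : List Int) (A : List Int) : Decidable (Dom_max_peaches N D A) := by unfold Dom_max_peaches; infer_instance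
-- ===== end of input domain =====

-- B replaces A's per-day binary heap of (expiry, count) batches by a bucket array of counts
-- indexed by expiry day with an amortized scan pointer; same value on all inputs A returns on.

-- ===== PORT A =====
-- heapq is ported by its CONTRACT, which is exact here: heappush adds one item, heappop removes
-- and returns the least item under Python tuple (lexicographic) order; since items are compared
-- by value, representing the heap as the plain list of its items computes the same results.
def pvLexLe (p q : Int × Int) : Bool :=
  decide (p.1 < q.1) || (decide (p.1 = q.1) && decide (p.2 ≤ q.2))

def pvHeapPush (h : List (Int × Int)) (x : Int × Int) : List (Int × Int) := h ++ [x]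

-- heappop = remove a least element (all least elements are equal values)
def pvPopMin (x : Int × Int) : List (Int × Int) → (Int × Int) × List (Int × Int)
  | [] => (x, [])
  | y :: rest =>
    let mr := pvPopMin y rest
    if pvLexLe x mr.1 then (x, y :: rest) else (mr.1, x :: mr.2)

theorem pvPopMin_length (x : Int × Int) (l : List (Int × Int)) :
    ((pvPopMin x l).2).length = l.length := by
  induction l generalizing x with
  | nil => rfl
  | cons y rest ih => simp only [pvPopMin]; split <;> simp [ih]

-- A's inner `while heap:` loop: pop until an unexpired batch is found (eat one) or the heap empties
def pvEat (day t : Int) : List (Int × Int) → List (Int × Int) × Int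
  | [] => ([], t)
  | x :: hs =>
    if day < (pvPopMin x hs).1.1 then
      (if 1 < (pvPopMin x hs).1.2 then
         pvHeapPush (pvPopMin x hs).2 ((pvPopMin x hs).1.1, (pvPopMin x hs).1.2 - 1)
       else (pvPopMin x hs).2, t + 1)
    else pvEat day t (pvPopMin x hs).2
  termination_by h => h.length
  decreasing_by simp [pvPopMin_length]

-- A's loop body for one day
def pvStepA (D A : List Int) (st : List (Int × Int) × Int) (day : Int) : List (Int × Int) × Int :=
  let h := if day < (D.length : Int) ∧ 0 < PySem.List.pyGetD D day 0 then
      pvHeapPush st.1 (day + PySem.List.pyGetD A day 0, PySem.List.pyGetD D day 0)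
    else st.1
  pvEat day st.2 h

-- the asserts, max(A) on empty A and A[day] past the end raise in Python: excluded by Pre_
def max_peaches (N : Int) (D : List Int) (A : List Int) : Int :=
  let maxA : Int := (PySem.List.max? A id).getD 0
  let maxDays : Int := (D.length : Int) + maxA
  ((PySem.List.pyRange 0 maxDays 1).foldl (pvStepA D A) (([], 0) : List (Int × Int) × Int)).2

-- ===== PORT B =====
-- `while ptr < max_days and counts[ptr] == 0: ptr += 1`
def pvScan (counts : List Int) (md q : Int) : Int :=
  if h : q < md ∧ PySem.List.pyGetD counts q 0 = 0 then pvScan counts md (q + 1) else q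
  termination_by (md - q).toNat
  decreasing_by omega

-- B's loop body for one day; state = (counts, total, ptr)
def pvStepB (D A : List Int) (md : Int) (st : List Int × Int × Int) (day : Int) :
    List Int × Int × Int :=
  let cp : List Int × Int :=
    if day < (D.length : Int) ∧ 0 < PySem.List.pyGetD D day 0 then
      let e := day + PySem.List.pyGetD A day 0
      (PySem.List.pySetD st.1 e (PySem.List.pyGetD st.1 e 0 + PySem.List.pyGetD D day 0),
       if e < st.2.2 then e else st.2.2)
    else (st.1, st.2.2)
  let p1 := if cp.2 ≤ day then day + 1 else cp.2
  let p2 := pvScan cp.1 md p1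
  if p2 < md then
    (PySem.List.pySetD cp.1 p2 (PySem.List.pyGetD cp.1 p2 0 - 1), st.2.1 + 1, p2)
  else (cp.1, st.2.1, p2)

def max_peaches_alt (N : Int) (D : List Int) (A : List Int) : Int :=
  let maxA : Int := (PySem.List.max? A id).getD 0
  let md : Int := (D.length : Int) + maxA
  ((PySem.List.pyRange 0 md 1).foldl (pvStepB D A md)
      ((List.replicate (md + 1).toNat 0, 0, 0) : List Int × Int × Int)).2.1

-- ===== PRECONDITION & SPEC =====
-- Pre_ excludes exactly the inputs on which A raises: AssertionError (N, a Di or an Ai out of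
-- range), ValueError (max(A) with A empty), IndexError (some D[i] > 0 with i ≥ len(A)).
def Pre_max_peaches (N : Int) (D : List Int) (A : List Int) : Prop :=
  1 ≤ N ∧ N ≤ 100000 ∧ (∀ x ∈ D, 0 ≤ x ∧ x ≤ 10000) ∧ (∀ x ∈ A, 0 ≤ x ∧ x ≤ 10000) ∧
  A ≠ [] ∧ (∀ i ∈ List.range D.length, 0 < D.getD i 0 → i < A.length)
instance (N : Int) (D : List Int) (A : List Int) : Decidable (Pre_max_peaches N D A) := by
  unfold Pre_max_peaches; infer_instance

def pvWitness_max_peaches : Int × List Int × List Int := (1, [2, 1], [1, 2])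

def Spec_max_peaches (N : Int) (D : List Int) (A : List Int) (out : Int) : Prop :=
  out = max_peaches_alt N D A
instance (N : Int) (D : List Int) (A : List Int) (out : Int) :
    Decidable (Spec_max_peaches N D A out) := by unfold Spec_max_peaches; infer_instance

-- ===== CLAIM (what is proved, stated in full; the proofs are below) =====
def Claim_equal_max_peaches : Prop := ∀ (N : Int) (D : List Int) (A : List Int),
  Dom_max_peaches N D A → Pre_max_peaches N D A → Spec_max_peaches N D A (max_peaches N D A)

-- ===== LEMMAS AND PROOFS =====

-- number of not-yet-eaten peaches with expiry e held in heap h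
def pvUnits (h : List (Int × Int)) (e : Int) : Int :=
  (h.map (fun p => if p.1 = e then p.2 else 0)).sum

-- bucket e of B's counts array
def pvCnt (counts : List Int) (e : Int) : Int := counts.getD e.toNat 0

-- simulation invariant between A's state (heap, total) and B's state (counts, total, ptr)
-- at the start of day d: totals agree, counts has its fixed length, heap entries are positive
-- batches expiring before day md, unexpired units agree bucket-wise, and every bucket strictly
-- between d and ptr is empty.
def pvInv (md d : Int) (sa : List (Int × Int) × Int) (sb : List Int × Int × Int) : Prop :=
  sa.2 = sb.2.1 ∧
  sb.1.length = (md + 1).toNat ∧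
  (∀ p ∈ sa.1, 0 < p.2 ∧ p.1 < md) ∧
  (∀ e, d < e → pvUnits sa.1 e = pvCnt sb.1 e) ∧
  (∀ e, d < e → e < sb.2.2 → pvCnt sb.1 e = 0) ∧
  0 ≤ sb.2.2 ∧ sb.2.2 ≤ md

theorem pvUnits_cons (p : Int × Int) (h : List (Int × Int)) (e : Int) :
    pvUnits (p :: h) e = (if p.1 = e then p.2 else 0) + pvUnits h e := by
  simp [pvUnits]

theorem pvUnits_append (h1 h2 : List (Int × Int)) (e : Int) :
    pvUnits (h1 ++ h2) e = pvUnits h1 e + pvUnits h2 e := by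
  simp [pvUnits]

theorem pvUnits_perm {h1 h2 : List (Int × Int)} (hp : h1.Perm h2) (e : Int) :
    pvUnits h1 e = pvUnits h2 e :=
  List.Perm.sum_eq (hp.map _)

theorem pvUnits_eq_zero {h : List (Int × Int)} {e : Int} (hne : ∀ p ∈ h, p.1 ≠ e) :
    pvUnits h e = 0 := by
  induction h with
  | nil => rfl
  | cons q hs ih =>
    rw [pvUnits_cons, if_neg (hne q (by simp)), ih (fun p hp => hne p (by simp [hp]))]
    ring

theorem pvUnits_exists {h : List (Int × Int)} {e : Int} (hne : pvUnits h e ≠ 0) :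
    ∃ p ∈ h, p.1 = e := by
  by_contra hc
  push_neg at hc
  exact hne (pvUnits_eq_zero hc)

theorem pvUnits_nonneg {h : List (Int × Int)} (hpos : ∀ p ∈ h, 0 < p.2) (e : Int) :
    0 ≤ pvUnits h e := by
  induction h with
  | nil => exact le_refl 0
  | cons q hs ih =>
    rw [pvUnits_cons]
    have h1 : 0 < q.2 := hpos q (by simp)
    have h2 : 0 ≤ pvUnits hs e := ih (fun p hp => hpos p (by simp [hp]))
    split <;> omega

theorem pvUnits_pos {h : List (Int × Int)} (hpos : ∀ p ∈ h, 0 < p.2) {p : Int × Int}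
    (hm : p ∈ h) : 0 < pvUnits h p.1 := by
  induction h with
  | nil => cases hm
  | cons q hs ih =>
    rw [pvUnits_cons]
    have h2 : 0 ≤ pvUnits hs p.1 := pvUnits_nonneg (fun r hr => hpos r (by simp [hr])) p.1
    have hq2 : 0 < q.2 := hpos q (by simp)
    rcases List.mem_cons.1 hm with h | h
    · subst h
      rw [if_pos rfl]
      omega
    · have h3 : 0 < pvUnits hs p.1 := ih (fun r hr => hpos r (by simp [hr])) h
      split <;> omega

theorem pvPopMin_perm (x : Int × Int) (l : List (Int × Int)) :
    ((pvPopMin x l).1 :: (pvPopMin x l).2).Perm (x :: l) := by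
  induction l generalizing x with
  | nil => exact List.Perm.refl _
  | cons y rest ih =>
    simp only [pvPopMin]
    split
    · exact List.Perm.refl _
    · exact (List.Perm.swap x (pvPopMin y rest).1 (pvPopMin y rest).2).trans ((ih y).cons x)

theorem pvPopMin_fst_le (x : Int × Int) (l : List (Int × Int)) :
    ∀ y ∈ x :: l, (pvPopMin x l).1.1 ≤ y.1 := by
  induction l generalizing x with
  | nil =>
    intro y hy
    rcases List.mem_singleton.1 hy with rfl
    exact le_refl _
  | cons z rest ih =>
    intro y hy
    simp only [pvPopMin]
    split
    · rename_i hle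
      have hx : x.1 ≤ (pvPopMin z rest).1.1 := by
        simp only [pvLexLe, Bool.or_eq_true, Bool.and_eq_true, decide_eq_true_eq] at hle
        omega
      rcases List.mem_cons.1 hy with rfl | hy2
      · exact le_refl _
      · exact le_trans hx (ih z y hy2)
    · rename_i hle
      have hx : (pvPopMin z rest).1.1 ≤ x.1 := by
        simp only [pvLexLe, Bool.or_eq_true, Bool.and_eq_true, decide_eq_true_eq] at hle
        omega
      rcases List.mem_cons.1 hy with rfl | hy2
      · exact hx
      · exact ih z y hy2

theorem pvPopMin_mem (x : Int × Int) (l : List (Int × Int)) :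
    (pvPopMin x l).1 ∈ x :: l :=
  (pvPopMin_perm x l).mem_iff.1 (by simp)

theorem pvPopMin_subset (x : Int × Int) (l : List (Int × Int)) :
    ∀ p ∈ (pvPopMin x l).2, p ∈ x :: l :=
  fun p hp => (pvPopMin_perm x l).mem_iff.1 (by simp [hp])

theorem pvUnits_popMin (x : Int × Int) (l : List (Int × Int)) (e : Int) :
    pvUnits (x :: l) e =
      (if (pvPopMin x l).1.1 = e then (pvPopMin x l).1.2 else 0) + pvUnits (pvPopMin x l).2 e := by
  rw [← pvUnits_cons, pvUnits_perm (pvPopMin_perm x l)]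

-- A's inner loop finds nothing when every batch has expired
theorem pvEat_expired (day t : Int) (h : List (Int × Int)) (hexp : ∀ p ∈ h, p.1 ≤ day) :
    pvEat day t h = ([], t) := by
  match h with
  | [] => simp [pvEat]
  | x :: hs =>
    have hle : ¬ day < (pvPopMin x hs).1.1 := not_lt.2 (hexp _ (pvPopMin_mem x hs))
    rw [pvEat, if_neg hle]
    exact pvEat_expired day t (pvPopMin x hs).2 (fun p hp => hexp p (pvPopMin_subset x hs p hp))
  termination_by h.length
  decreasing_by simp [pvPopMin_length]

-- A's inner loop eats exactly one unit of the nearest unexpired expiry m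
theorem pvEat_eats (day t m : Int) (h : List (Int × Int))
    (hpos : ∀ p ∈ h, 0 < p.2) (hdm : day < m) (hm : pvUnits h m ≠ 0)
    (hmin : ∀ e, day < e → e < m → pvUnits h e = 0) :
    (pvEat day t h).2 = t + 1 ∧
    (∀ e, day < e → pvUnits (pvEat day t h).1 e = pvUnits h e - (if e = m then 1 else 0)) ∧
    (∀ p ∈ (pvEat day t h).1, 0 < p.2 ∧ ∃ q ∈ h, p.1 = q.1) := by
  match h with
  | [] => exact absurd rfl hm
  | x :: hs =>
    have hpm := pvPopMin_mem x hs
    by_cases hcase : day < (pvPopMin x hs).1.1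
    · have hc : 0 < (pvPopMin x hs).1.2 := hpos _ hpm
      have heq : (pvPopMin x hs).1.1 = m := by
        have hge : ¬ (pvPopMin x hs).1.1 < m := by
          intro hlt
          have h1 := pvUnits_pos hpos hpm
          rw [hmin _ hcase hlt] at h1
          exact lt_irrefl 0 h1
        obtain ⟨q, hq, hq1⟩ := pvUnits_exists hm
        have hle := pvPopMin_fst_le x hs q hq
        omega
      rw [pvEat, if_pos hcase]
      refine ⟨rfl, ?_, ?_⟩
      · intro e _
        rw [pvUnits_popMin x hs e]
        by_cases h1c : 1 < (pvPopMin x hs).1.2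
        · rw [if_pos h1c]
          unfold pvHeapPush
          rw [pvUnits_append, pvUnits_cons]
          simp only [pvUnits]
          by_cases hee : e = m
          · rw [if_pos (by omega : (pvPopMin x hs).1.1 = e), if_pos (by omega : (pvPopMin x hs).1.1 = e), if_pos hee]
            simp; ring
          · rw [if_neg (by omega : ¬ (pvPopMin x hs).1.1 = e), if_neg (by omega : ¬ (pvPopMin x hs).1.1 = e), if_neg hee]
            simp
        · rw [if_neg h1c]
          have hc1 : (pvPopMin x hs).1.2 = 1 := by omega
          by_cases hee : e = m
          · rw [if_pos (by omega : (pvPopMin x hs).1.1 = e), if_pos hee, hc1]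
            ring
          · rw [if_neg (by omega : ¬ (pvPopMin x hs).1.1 = e), if_neg hee]
            ring
      · intro p hp
        by_cases h1c : 1 < (pvPopMin x hs).1.2
        · rw [if_pos h1c] at hp
          unfold pvHeapPush at hp
          rcases List.mem_append.1 hp with hp2 | hp2
          · exact ⟨hpos p (pvPopMin_subset x hs p hp2), p, pvPopMin_subset x hs p hp2, rfl⟩
          · rcases List.mem_singleton.1 hp2 with rfl
            exact ⟨by omega, (pvPopMin x hs).1, hpm, rfl⟩
        · rw [if_neg h1c] at hp
          exact ⟨hpos p (pvPopMin_subset x hs p hp), p, pvPopMin_subset x hs p hp, rfl⟩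
    · have hle : (pvPopMin x hs).1.1 ≤ day := not_lt.1 hcase
      have htrans : ∀ e, day < e → pvUnits (pvPopMin x hs).2 e = pvUnits (x :: hs) e := by
        intro e he
        rw [pvUnits_popMin x hs e, if_neg (by omega : ¬ (pvPopMin x hs).1.1 = e)]
        ring
      have hpos2 : ∀ p ∈ (pvPopMin x hs).2, 0 < p.2 :=
        fun p hp => hpos p (pvPopMin_subset x hs p hp)
      have hm2 : pvUnits (pvPopMin x hs).2 m ≠ 0 := by rw [htrans m hdm]; exact hm
      have hmin2 : ∀ e, day < e → e < m → pvUnits (pvPopMin x hs).2 e = 0 := by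
        intro e a b
        rw [htrans e a]
        exact hmin e a b
      obtain ⟨ih1, ih2, ih3⟩ := pvEat_eats day t m (pvPopMin x hs).2 hpos2 hdm hm2 hmin2
      rw [pvEat, if_neg hcase]
      refine ⟨ih1, ?_, ?_⟩
      · intro e he
        rw [ih2 e he, htrans e he]
      · intro p hp
        obtain ⟨hp1, q, hq, hq1⟩ := ih3 p hp
        exact ⟨hp1, q, pvPopMin_subset x hs q hq, hq1⟩
  termination_by h.length
  decreasing_by simp [pvPopMin_length]

-- B's scan finds the first non-empty bucket at or after q (or stops at md)
theorem pvScan_spec (counts : List Int) (md q : Int) (h0 : 0 ≤ q) (h1 : q ≤ md) :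
    q ≤ pvScan counts md q ∧ pvScan counts md q ≤ md ∧
    (∀ e, q ≤ e → e < pvScan counts md q → pvCnt counts e = 0) ∧
    (pvScan counts md q < md → pvCnt counts (pvScan counts md q) ≠ 0) := by
  rw [pvScan]
  split
  · rename_i hcond
    obtain ⟨hlt, hz⟩ := hcond
    obtain ⟨s1, s2, s3, s4⟩ := pvScan_spec counts md (q + 1) (by omega) (by omega)
    refine ⟨by omega, s2, ?_, s4⟩
    intro e he1 he2
    by_cases heq : e = q
    · subst heq
      rw [PySem.List.pyGetD_of_nonneg _ _ h0] at hz
      exact hz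
    · exact s3 e (by omega) he2
  · rename_i hcond
    push_neg at hcond
    refine ⟨le_refl _, h1, fun e a b => absurd a (by omega), ?_⟩
    intro hlt
    have hval := hcond hlt
    rw [PySem.List.pyGetD_of_nonneg _ _ h0] at hval
    exact hval
  termination_by (md - q).toNat
  decreasing_by omega

theorem pvCnt_set (counts : List Int) (i v e : Int) (hi : 0 ≤ i)
    (hlen : i.toNat < counts.length) (he : 0 ≤ e) :
    pvCnt (PySem.List.pySetD counts i v) e = if e = i then v else pvCnt counts e := by
  rw [PySem.List.pySetD_of_nonneg _ _ hi]
  unfold pvCnt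
  by_cases h : e = i
  · subst h
    rw [List.getD_eq_getElem?_getD, List.getElem?_set, if_pos rfl, if_pos hlen, if_pos rfl]
    rfl
  · have hne : i.toNat ≠ e.toNat := by omega
    rw [List.getD_eq_getElem?_getD, List.getElem?_set, if_neg hne,
      ← List.getD_eq_getElem?_getD, if_neg h]

theorem pvCnt_replicate (n : Nat) (e : Int) : pvCnt (List.replicate n 0) e = 0 := by
  unfold pvCnt
  by_cases h : e.toNat < n
  · rw [List.getD_replicate _ h]
  · rw [List.getD_eq_default _ _ (by simpa using h)]

theorem pvCnt_oob (counts : List Int) (e : Int) (h : (counts.length : Int) ≤ e) :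
    pvCnt counts e = 0 := by
  unfold pvCnt
  rw [List.getD_eq_default _ _ (by omega)]

-- the eat/scan half of one day, after arrivals have been merged into both states
theorem pvStep_core (md d t : Int) (h1 : List (Int × Int)) (counts : List Int) (ptr1 : Int)
    (h0 : 0 ≤ d) (hd : d < md)
    (hL : counts.length = (md + 1).toNat)
    (hPE : ∀ p ∈ h1, 0 < p.2 ∧ p.1 < md)
    (hU : ∀ e, d < e → pvUnits h1 e = pvCnt counts e)
    (hZ : ∀ e, d < e → e < ptr1 → pvCnt counts e = 0)
    (hptr : ptr1 ≤ md) :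
    pvInv md (d + 1) (pvEat d t h1)
      (if pvScan counts md (if ptr1 ≤ d then d + 1 else ptr1) < md then
        (PySem.List.pySetD counts (pvScan counts md (if ptr1 ≤ d then d + 1 else ptr1))
          (PySem.List.pyGetD counts (pvScan counts md (if ptr1 ≤ d then d + 1 else ptr1)) 0 - 1),
         t + 1, pvScan counts md (if ptr1 ≤ d then d + 1 else ptr1))
       else (counts, t, pvScan counts md (if ptr1 ≤ d then d + 1 else ptr1))) := by
  set p1 := if ptr1 ≤ d then d + 1 else ptr1 with hp1def
  have hp1a : d < p1 := by rw [hp1def]; split <;> omega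
  have hp1b : p1 ≤ md := by rw [hp1def]; split <;> omega
  have hZ1 : ∀ e, d < e → e < p1 → pvCnt counts e = 0 := by
    intro e he1 he2
    rw [hp1def] at he2
    by_cases hsp : ptr1 ≤ d
    · rw [if_pos hsp] at he2; omega
    · rw [if_neg hsp] at he2; exact hZ e he1 he2
  obtain ⟨s1, s2, s3, s4⟩ := pvScan_spec counts md p1 (by omega) hp1b
  set p2 := pvScan counts md p1 with hp2def
  have hz2 : ∀ e, d < e → e < p2 → pvCnt counts e = 0 := by
    intro e he1 he2
    by_cases hcmp : e < p1
    · exact hZ1 e he1 hcmp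
    · exact s3 e (by omega) he2
  have hdp2 : d < p2 := by omega
  by_cases hlt : p2 < md
  · have hcntpos : pvCnt counts p2 ≠ 0 := s4 hlt
    have hum : pvUnits h1 p2 ≠ 0 := by rw [hU p2 hdp2]; exact hcntpos
    have hmin : ∀ e, d < e → e < p2 → pvUnits h1 e = 0 := by
      intro e a b
      rw [hU e a]
      exact hz2 e a b
    obtain ⟨e1, e2, e3⟩ := pvEat_eats d t p2 h1 (fun p hp => (hPE p hp).1) hdp2 hum hmin
    rw [if_pos hlt]
    unfold pvInv
    dsimp only
    have hp2len : p2.toNat < counts.length := by omega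
    have hget : PySem.List.pyGetD counts p2 0 = pvCnt counts p2 := by
      unfold pvCnt
      exact PySem.List.pyGetD_of_nonneg counts 0 (by omega)
    refine ⟨e1, by simpa [PySem.List.length_pySetD] using hL, ?_, ?_, ?_, by omega, by omega⟩
    · intro p hp
      obtain ⟨hpa, q, hq, hqe⟩ := e3 p hp
      exact ⟨hpa, hqe ▸ (hPE q hq).2⟩
    · intro e he
      rw [e2 e (by omega), hU e (by omega),
        pvCnt_set counts p2 _ e (by omega) hp2len (by omega), hget]
      split
      · rename_i hee
        subst hee
        rfl
      · omega
    · intro e he1 he2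
      rw [pvCnt_set counts p2 _ e (by omega) hp2len (by omega),
        if_neg (by omega : ¬ e = p2)]
      exact hz2 e (by omega) he2
  · have hp2 : p2 = md := by omega
    have hexp : ∀ p ∈ h1, p.1 ≤ d := by
      intro p hp
      by_contra hgt
      push_neg at hgt
      have hu := pvUnits_pos (fun q hq => (hPE q hq).1) hp
      rw [hU p.1 hgt, hz2 p.1 hgt (by have := (hPE p hp).2; omega)] at hu
      exact lt_irrefl 0 hu
    rw [if_neg hlt, pvEat_expired d t h1 hexp]
    unfold pvInv
    dsimp only
    refine ⟨rfl, hL, by simp, ?_, ?_, by omega, by omega⟩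
    · intro e he
      have hunil : pvUnits ([] : List (Int × Int)) e = 0 := rfl
      rw [hunil]
      by_cases hcmp : e < md
      · exact (hz2 e (by omega) (by omega)).symm
      · by_cases hcmp2 : e = md
        · rw [hcmp2, ← hU md (by omega)]
          exact (pvUnits_eq_zero (fun p hp => by have := (hPE p hp).2; omega)).symm
        · exact (pvCnt_oob counts e (by omega)).symm
    · intro e he1 he2
      exact hz2 e (by omega) he2

-- one full day preserves the invariant
theorem pvStep_inv (D A : List Int) (md d : Int) (sa : List (Int × Int) × Int)
    (sb : List Int × Int × Int)
    (hb : ∀ i : Int, 0 ≤ i → i < (D.length : Int) → 0 < PySem.List.pyGetD D i 0 →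
        0 ≤ PySem.List.pyGetD A i 0 ∧ i + PySem.List.pyGetD A i 0 < md)
    (h0 : 0 ≤ d) (h1 : d < md) (hinv : pvInv md d sa sb) :
    pvInv md (d + 1) (pvStepA D A sa d) (pvStepB D A md sb d) := by
  obtain ⟨hT, hL, hPE, hU, hZ, hq0, hqm⟩ := hinv
  unfold pvStepA pvStepB
  rw [hT]
  by_cases harr : d < (D.length : Int) ∧ 0 < PySem.List.pyGetD D d 0
  · simp only [if_pos harr]
    obtain ⟨hA0, hAe⟩ := hb d h0 harr.1 harr.2
    set e0 := d + PySem.List.pyGetD A d 0 with he0def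
    set v0 := PySem.List.pyGetD D d 0 with hv0def
    have he00 : 0 ≤ e0 := by omega
    have he0m : e0 < md := hAe
    have he0len : e0.toNat < sb.1.length := by omega
    have hget : PySem.List.pyGetD sb.1 e0 0 = pvCnt sb.1 e0 :=
      PySem.List.pyGetD_of_nonneg _ _ he00
    exact pvStep_core md d sb.2.1
      (pvHeapPush sa.1 (e0, v0))
      (PySem.List.pySetD sb.1 e0 (PySem.List.pyGetD sb.1 e0 0 + v0))
      (if e0 < sb.2.2 then e0 else sb.2.2) h0 h1
      (by simpa [PySem.List.length_pySetD] using hL)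
      (by
        intro p hp
        unfold pvHeapPush at hp
        rcases List.mem_append.1 hp with hp2 | hp2
        · exact hPE p hp2
        · rcases List.mem_singleton.1 hp2 with rfl
          exact ⟨harr.2, he0m⟩)
      (by
        intro e he
        unfold pvHeapPush
        rw [pvUnits_append, pvUnits_cons, hU e he,
          pvCnt_set sb.1 e0 _ e he00 he0len (by omega), hget]
        have hunil : pvUnits ([] : List (Int × Int)) e = 0 := rfl
        rw [hunil]
        by_cases hee : e = e0
        · rw [if_pos (by omega : e0 = e), if_pos hee, hee]; ring
        · rw [if_neg (by omega : ¬ e0 = e), if_neg hee]; ring)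
      (by
        intro e he1 he2
        have hne : ¬ e = e0 := by
          by_cases hsp : e0 < sb.2.2
          · rw [if_pos hsp] at he2; omega
          · rw [if_neg hsp] at he2; omega
        rw [pvCnt_set sb.1 e0 _ e he00 he0len (by omega), if_neg hne]
        by_cases hsp : e0 < sb.2.2
        · rw [if_pos hsp] at he2; exact hZ e he1 (by omega)
        · rw [if_neg hsp] at he2; exact hZ e he1 he2)
      (by split <;> omega)
  · simp only [if_neg harr]
    exact pvStep_core md d sb.2.1 sa.1 sb.1 sb.2.2 h0 h1 hL hPE hU hZ hqm

-- the two day loops keep equal totals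
theorem pvLoop (D A : List Int) (md : Int)
    (hb : ∀ i : Int, 0 ≤ i → i < (D.length : Int) → 0 < PySem.List.pyGetD D i 0 →
        0 ≤ PySem.List.pyGetD A i 0 ∧ i + PySem.List.pyGetD A i 0 < md)
    (d : Int) (sa : List (Int × Int) × Int) (sb : List Int × Int × Int)
    (h0 : 0 ≤ d) (hinv : pvInv md d sa sb) :
    ((PySem.List.pyRange d md 1).foldl (pvStepA D A) sa).2 =
    ((PySem.List.pyRange d md 1).foldl (pvStepB D A md) sb).2.1 := by
  by_cases hd : d < md
  · rw [PySem.List.pyRange_one_cons hd]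
    simp only [List.foldl_cons]
    exact pvLoop D A md hb (d + 1) _ _ (by omega)
      (pvStep_inv D A md d sa sb hb h0 hd hinv)
  · rw [PySem.List.pyRange_one_eq_nil (by omega)]
    exact hinv.1
  termination_by (md - d).toNat
  decreasing_by omega

theorem pvMax_some (x : Int) (xs : List Int) : ∃ m, PySem.List.max? (x :: xs) id = some m := by
  induction xs generalizing x with
  | nil => exact ⟨x, rfl⟩
  | cons y ys ih =>
    by_cases hxy : x < y
    · have h : PySem.List.max? (x :: y :: ys) id = PySem.List.max? (y :: ys) id := by
        unfold PySem.List.max?; simp [List.foldl_cons, hxy]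
      rw [h]; exact ih y
    · have h : PySem.List.max? (x :: y :: ys) id = PySem.List.max? (x :: ys) id := by
        unfold PySem.List.max?; simp [List.foldl_cons, hxy]
      rw [h]; exact ih x

-- ===== VERDICT (by name: the statement is the Claim_ definition above) =====
theorem max_peaches_spec : Claim_equal_max_peaches := by
  intro N D A _ hpre
  obtain ⟨_, _, hD, hA, hne, hidx⟩ := hpre
  unfold Spec_max_peaches max_peaches max_peaches_alt
  obtain ⟨x, xs, rfl⟩ : ∃ x xs, A = x :: xs := by
    cases A with
    | nil => exact absurd rfl hne
    | cons x xs => exact ⟨x, xs, rfl⟩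
  obtain ⟨m, hm⟩ := pvMax_some x xs
  rw [hm]
  simp only [Option.getD_some]
  have hmmem : m ∈ x :: xs := PySem.List.max?_mem hm
  have hmax : ∀ y ∈ x :: xs, y ≤ m := fun y hy => PySem.List.max?_isMax hm y hy
  have hm0 : 0 ≤ m := (hA m hmmem).1
  apply pvLoop D (x :: xs) ((D.length : Int) + m) ?_ 0 _ _ (le_refl 0)
  · unfold pvInv
    dsimp only
    refine ⟨rfl, by simp, by simp, ?_, by omega, by omega, by omega⟩
    intro e _
    have hunil : pvUnits ([] : List (Int × Int)) e = 0 := rfl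
    rw [hunil, pvCnt_replicate]
  · intro i hi0 hiD hiDpos
    rw [PySem.List.pyGetD_of_nonneg _ _ hi0] at hiDpos
    have hiA : i.toNat < (x :: xs).length := by
      apply hidx i.toNat (List.mem_range.2 (by omega)) hiDpos
    rw [PySem.List.pyGetD_of_nonneg _ _ hi0, List.getD_eq_getElem _ _ hiA]
    have hmem := List.getElem_mem hiA
    have h1 := (hA _ hmem).1
    have h2 := hmax _ hmem
    omega
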